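-- pv_equiv track=rewrite | github.com/ChaosIsHarmony/ConscientiaDialogueSystem | convertMaoToJson.py | convert_npc_switchers
-- ===== SOURCE A (Python) =====
-- from typing import List, Tuple
--
-- def parse_blocks(rawSectionLines: List[str]) -> List[List[str]]:
--     '''
--     Aggregates the lines relevant to an address specific block.
--     '''
--     blocks = []
--     i = 0
--     while i < len(rawSectionLines):
--         block = []
--         if "[/" in rawSectionLines[i]:
--             while not "/]" in rawSectionLines[i]:
--                 block.append(rawSectionLines[i])
--                 i += 1
--             block.append(rawSectionLines[i])
--         else:
--             i += 1
--             continue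
--
--         if len(block) > 0:
--             blocks.append(block)
--
--     return blocks
--
-- def convert_npc_switchers(npcSwitchersMao: List[str]) -> str:
--     # aggregate into address-specific, self-contained blocks
--     npcSwitchersBlocks = parse_blocks(npcSwitchersMao)
--     # convert to JSON string
--     npcSwitchersJson = "{"
--     for block in npcSwitchersBlocks:
--         # parse address
--         add_start = block[0].find('/')+1
--         add_end = block[0].find(']')
--         address = block[0][add_start:add_end]
--         npcSwitchersJson += "\"" + address + "\":"
--         # parse npc id
--         npc_id_start = block[1].find(':')+1
--         npc_id_end = block[1].find('|', npc_id_start)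
--         npc_id = block[1][npc_id_start:npc_id_end]
--         npcSwitchersJson += npc_id + ", "
--
--     if len(npcSwitchersJson) > 1:
--         npcSwitchersJson = npcSwitchersJson[:-2] + "}" # trm trailing comma
--     else:
--         npcSwitchersJson = "{}" # Unfinished dialogue file OR no switchers
--
--     # check for accuracy
--     #  check_for_accuracy(npcSwitchersJson)
--
--     return npcSwitchersJson
-- ===== SOURCE B (Python) =====
-- from typing import List
--
-- def convert_npc_switchers(npcSwitchersMao: List[str]) -> str:
--     # Single pass: emit each entry the moment a block opens, skipping to just
--     # past its closing line; no intermediate blocks table, no second pass.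
--     entries = []
--     i = 0
--     while i < len(npcSwitchersMao):
--         line = npcSwitchersMao[i]
--         if "[/" in line:
--             address = line[line.find('/') + 1 : line.find(']')]
--             second = npcSwitchersMao[i + 1]
--             s = second.find(':') + 1
--             entries.append('"' + address + '":' + second[s:second.find('|', s)])
--             j = i + 1
--             while "/]" not in npcSwitchersMao[j]:
--                 j += 1
--             i = j + 1
--         else:
--             i += 1
--     return "{" + ", ".join(entries) + "}"
-- ===== Notes on version B (the rewrite author's own statement) =====
-- stated objective: simpler
-- what changed: B replaces A's two-phase design (build an intermediate list of line-blocks, then a second pass that formats each block and trims the trailing comma off the accumulated string) with a single scan that emits each formatted entry as soon as its block opens and joins the entries with ', ' at the end, so the blocks table, the second pass and the trailing-comma trimming all disappear.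
import Mathlib
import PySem

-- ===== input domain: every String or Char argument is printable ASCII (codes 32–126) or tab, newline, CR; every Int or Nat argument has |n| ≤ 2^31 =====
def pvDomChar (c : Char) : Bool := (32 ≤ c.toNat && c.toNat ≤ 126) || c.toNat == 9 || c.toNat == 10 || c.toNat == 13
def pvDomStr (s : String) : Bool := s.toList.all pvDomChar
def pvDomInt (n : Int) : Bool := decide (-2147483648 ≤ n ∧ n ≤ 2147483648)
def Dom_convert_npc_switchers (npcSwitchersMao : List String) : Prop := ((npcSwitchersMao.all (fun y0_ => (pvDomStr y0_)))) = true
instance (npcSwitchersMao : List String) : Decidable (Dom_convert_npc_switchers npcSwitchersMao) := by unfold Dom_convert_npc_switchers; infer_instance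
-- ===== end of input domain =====

-- B collapses A's two-phase parse-blocks-then-emit into one scan that emits each entry as its
-- block opens (objective: simpler — no intermediate blocks table, no trailing-comma trimming).


-- ===== PORT A =====
-- inner `while not "/]" in rawSectionLines[i]` of parse_blocks; running past the end is
-- Python's IndexError (excluded by Pre_), here the loop just stops there.
def pvInner (lines : List String) (i : Nat) (block : List String) : List String × Nat :=
  if h : i < lines.length then
    if PySem.Str.isIn "/]" lines[i] then (block, i)
    else pvInner lines (i + 1) (block ++ [lines[i]])
  else (block, i)
termination_by lines.length - i

-- outer `while i < len(rawSectionLines)` of parse_blocks; the loop does not advance `i` past a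
-- block's closing line, so on a closing line that itself contains "[/" Python loops forever —
-- the fuel (enough for every terminating run) only makes the port total there (excluded by Pre_).
def pvOuter (lines : List String) : Nat → Nat → List (List String) → List (List String)
  | 0, _, blocks => blocks
  | f + 1, i, blocks =>
    if i < lines.length then
      if PySem.Str.isIn "[/" (lines.getD i "") then
        let r := pvInner lines i []
        let block := r.1 ++ [lines.getD r.2 ""]
        pvOuter lines f r.2 (if block.length > 0 then blocks ++ [block] else blocks)
      else pvOuter lines f (i + 1) blocks
    else blocks

def parse_blocks (rawSectionLines : List String) : List (List String) :=
  pvOuter rawSectionLines (rawSectionLines.length + 1) 0 []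

def convert_npc_switchers (npcSwitchersMao : List String) : String :=
  let npcSwitchersBlocks := parse_blocks npcSwitchersMao
  let npcSwitchersJson :=
    npcSwitchersBlocks.foldl (fun acc block =>
      let b0 := PySem.List.pyGetD block 0 ""
      let add_start := PySem.Str.find b0 "/" + 1
      let add_end := PySem.Str.find b0 "]"
      let address := PySem.Str.slice b0 (some add_start) (some add_end)
      let acc := acc ++ "\"" ++ address ++ "\":"
      let b1 := PySem.List.pyGetD block 1 ""
      let npc_id_start := PySem.Str.find b1 ":" + 1
      let npc_id_end := PySem.Str.findFrom b1 "|" npc_id_start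
      let npc_id := PySem.Str.slice b1 (some npc_id_start) (some npc_id_end)
      acc ++ npc_id ++ ", ") "{"
  if PySem.Str.len npcSwitchersJson > 1 then
    PySem.Str.slice npcSwitchersJson none (some (-2)) ++ "}"
  else "{}"

-- ===== PORT B =====
-- `while "/]" not in npcSwitchersMao[j]: j += 1` — first index ≥ j whose line contains "/]";
-- past the end is Python's IndexError (excluded by Pre_), here it stops at lines.length.
def pvSkip (lines : List String) (j : Nat) : Nat :=
  if h : j < lines.length then
    if PySem.Str.isIn "/]" lines[j] then j else pvSkip lines (j + 1)
  else j
termination_by lines.length - j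

theorem pvSkip_ge (lines : List String) (j : Nat) : j ≤ pvSkip lines j := by
  unfold pvSkip
  split
  · split
    · exact le_refl j
    · exact le_trans (Nat.le_succ j) (pvSkip_ge lines (j + 1))
  · exact le_refl j
termination_by lines.length - j

def pvEntry (line second : String) : String :=
  let address := PySem.Str.slice line (some (PySem.Str.find line "/" + 1)) (some (PySem.Str.find line "]"))
  let s := PySem.Str.find second ":" + 1
  "\"" ++ address ++ "\":" ++ PySem.Str.slice second (some s) (some (PySem.Str.findFrom second "|" s))

def pvScan (lines : List String) (i : Nat) (entries : List String) : List String :=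
  if h : i < lines.length then
    if PySem.Str.isIn "[/" lines[i] then
      pvScan lines (pvSkip lines (i + 1) + 1)
        (entries ++ [pvEntry lines[i] (lines.getD (i + 1) "")])
    else pvScan lines (i + 1) entries
  else entries
termination_by lines.length - i
decreasing_by
  · have := pvSkip_ge lines (i + 1); omega
  · omega

def convert_npc_switchers_alt (npcSwitchersMao : List String) : String :=
  "{" ++ PySem.Str.join ", " (pvScan npcSwitchersMao 0 []) ++ "}"

-- ===== PRECONDITION & SPEC =====
-- Pre_ excludes exactly the inputs where A does not return: a line opening a block ("[/") with no
-- later closing line ("/]") makes A raise IndexError, and an opening line that itself contains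
-- "/]", or a closing line that also contains "[/", makes A loop forever.  `inBlock` says whether
-- the line under inspection sits inside an open block.
def pvWfL (inBlock : Bool) : List String → Bool
  | [] => !inBlock
  | l :: rest =>
    if inBlock then
      if PySem.Str.isIn "/]" l then !PySem.Str.isIn "[/" l && pvWfL false rest
      else pvWfL true rest
    else
      if PySem.Str.isIn "[/" l then !PySem.Str.isIn "/]" l && pvWfL true rest
      else pvWfL false rest

def Pre_convert_npc_switchers (npcSwitchersMao : List String) : Prop :=
  pvWfL false npcSwitchersMao = true
instance (npcSwitchersMao : List String) : Decidable (Pre_convert_npc_switchers npcSwitchersMao) := by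
  unfold Pre_convert_npc_switchers; infer_instance

def pvWitness_convert_npc_switchers : List String := ["[/addr]", "id:7|x", "/]"]

def Spec_convert_npc_switchers (npcSwitchersMao : List String) (out : String) : Prop := out = convert_npc_switchers_alt npcSwitchersMao
instance (npcSwitchersMao : List String) (out : String) : Decidable (Spec_convert_npc_switchers npcSwitchersMao out) := by unfold Spec_convert_npc_switchers; infer_instance

-- ===== CLAIM (what is proved, stated in full; the proofs are below) =====
def Claim_equal_convert_npc_switchers : Prop := ∀ (npcSwitchersMao : List String), Dom_convert_npc_switchers npcSwitchersMao → Pre_convert_npc_switchers npcSwitchersMao → Spec_convert_npc_switchers npcSwitchersMao (convert_npc_switchers npcSwitchersMao)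

-- ===== LEMMAS AND PROOFS =====

-- the entry A's fold appends for a block, read off the block's first two lines
def pvEntryOfBlock (block : List String) : String :=
  pvEntry (PySem.List.pyGetD block 0 "") (PySem.List.pyGetD block 1 "")

-- concatenation of a list of strings (spec-side only)
def pvConcat : List String → String
  | [] => ""
  | s :: rest => s ++ pvConcat rest

theorem pvConcat_toList (l : List String) : (pvConcat l).toList = (l.map String.toList).flatten := by
  induction l with
  | nil => simp [pvConcat]
  | cons s rest ih => simp [pvConcat, String.toList_append, ih]

theorem pvJoinFlat (sep : List Char) : ∀ (es : List (List Char)) (e : List Char),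
    ((e :: es).map (fun x => x ++ sep)).flatten = PySem.Chars.join sep (e :: es) ++ sep := by
  intro es
  induction es with
  | nil => intro e; simp [PySem.Chars.join_singleton]
  | cons f fs ih =>
    intro e
    simp only [List.map_cons, List.flatten_cons] at *
    rw [ih f, PySem.Chars.join_cons_cons]
    simp [List.append_assoc]

theorem pvSliceNegTwo (s : String) :
    (PySem.Str.slice s none (some (-2))).toList = s.toList.take (s.toList.length - 2) := by
  simp [PySem.Str.slice]
  rw [PySem.List.slice_to_neg_ofNat _ 2 (by omega), String.length_toList]


-- first index ≥ j whose line contains "/]" (none if there is none); proof-side only.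
def pvClose (lines : List String) (j : Nat) : Option Nat :=
  if h : j < lines.length then
    if PySem.Str.isIn "/]" lines[j] then some j else pvClose lines (j + 1)
  else none
termination_by lines.length - j

theorem pvClose_ge (lines : List String) (j c : Nat) (h : pvClose lines j = some c) : j ≤ c := by
  unfold pvClose at h
  split at h
  · split at h
    · injection h with h; omega
    · exact le_trans (Nat.le_succ j) (pvClose_ge lines (j + 1) c h)
  · simp at h
termination_by lines.length - j

-- index-based form of the well-formedness condition, used by the induction below
def pvWf (lines : List String) (i : Nat) : Bool :=
  if h : i < lines.length then
    if PySem.Str.isIn "[/" lines[i] then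
      if PySem.Str.isIn "/]" lines[i] then false
      else
        match hc : pvClose lines (i + 1) with
        | none => false
        | some j => !PySem.Str.isIn "[/" (lines.getD j "") && pvWf lines (j + 1)
    else pvWf lines (i + 1)
  else true
termination_by lines.length - i
decreasing_by
  · have := pvClose_ge lines (i + 1) j hc; omega
  · omega


theorem pvClose_spec (lines : List String) (j c : Nat) (h : pvClose lines j = some c) :
    c < lines.length ∧ PySem.Str.isIn "/]" (lines.getD c "") = true ∧
      ∀ k, j ≤ k → k < c → PySem.Str.isIn "/]" (lines.getD k "") = false := by
  unfold pvClose at h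
  split at h
  · rename_i hj
    split at h
    · rename_i hin
      injection h with h
      subst h
      refine ⟨hj, ?_, fun k hk1 hk2 => absurd hk1 (by omega)⟩
      simpa [List.getD, List.getElem?_eq_getElem, hj] using hin
    · rename_i hnin
      obtain ⟨h1, h2, h3⟩ := pvClose_spec lines (j + 1) c h
      refine ⟨h1, h2, fun k hk1 hk2 => ?_⟩
      rcases Nat.eq_or_lt_of_le hk1 with rfl | hlt
      · simpa [List.getD, List.getElem?_eq_getElem, hj] using Bool.eq_false_iff.mpr hnin
      · exact h3 k hlt hk2
  · simp at h
termination_by lines.length - j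

theorem pvSkip_eq_of_close (lines : List String) (j c : Nat) (h : pvClose lines j = some c) :
    pvSkip lines j = c := by
  unfold pvClose at h
  unfold pvSkip
  split at h
  · rename_i hj
    rw [dif_pos hj]
    split at h
    · rename_i hin
      rw [if_pos hin]; injection h
    · rename_i hnin
      rw [if_neg hnin]
      exact pvSkip_eq_of_close lines (j + 1) c h
  · simp at h
termination_by lines.length - j

theorem pvInner_eq (lines : List String) (c i : Nat) (block : List String) (hic : i ≤ c)
    (hc : c < lines.length)
    (hno : ∀ k, i ≤ k → k < c → PySem.Str.isIn "/]" (lines.getD k "") = false)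
    (hcc : PySem.Str.isIn "/]" (lines.getD c "") = true) :
    pvInner lines i block = (block ++ (lines.drop i).take (c - i), c) := by
  unfold pvInner
  rw [dif_pos (lt_of_le_of_lt hic hc)]
  rcases Nat.eq_or_lt_of_le hic with rfl | hlt
  · rw [if_pos (by simpa [List.getD, List.getElem?_eq_getElem, hc] using hcc)]
    simp
  · have hni : PySem.Str.isIn "/]" lines[i] = false := by
      simpa [List.getD, List.getElem?_eq_getElem, lt_of_le_of_lt hic hc] using
        hno i (le_refl i) hlt
    rw [if_neg (by rw [hni]; simp)]
    rw [pvInner_eq lines c (i + 1) (block ++ [lines[i]]) hlt hc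
      (fun k hk1 hk2 => hno k (by omega) hk2) hcc]
    rw [List.drop_eq_getElem_cons (lt_of_le_of_lt hic hc)]
    have : c - i = (c - (i + 1)) + 1 := by omega
    rw [this, List.take_succ_cons]
    simp
termination_by c - i

theorem pvBlockEntry (lines : List String) (i j : Nat) (hij : i < j) (hj : j < lines.length) :
    pvEntryOfBlock ((lines.drop i).take (j - i) ++ [lines.getD j ""])
      = pvEntry (lines.getD i "") (lines.getD (i + 1) "") := by
  have hi : i < lines.length := by omega
  unfold pvEntryOfBlock
  have h0 : ∀ b : List String, PySem.List.pyGetD b 0 "" = b.getD 0 "" := fun b => by simp [pysem]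
  have h1 : ∀ b : List String, PySem.List.pyGetD b 1 "" = b.getD 1 "" := fun b => by simp [pysem]
  rw [h0, h1]
  have g0 : ((lines.drop i).take (j - i) ++ [lines.getD j ""]).getD 0 "" = lines.getD i "" := by
    simp [List.getD, List.getElem?_append, List.length_take, List.length_drop, hij, hi]
  have g1 : ((lines.drop i).take (j - i) ++ [lines.getD j ""]).getD 1 "" = lines.getD (i + 1) "" := by
    rcases Nat.eq_or_lt_of_le (Nat.succ_le_of_lt hij) with hji | hji
    · have hmin : min 1 (lines.length - i) = 1 := by omega
      simp [List.getD, List.getElem?_append, List.length_take, List.length_drop, ← hji, hmin]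
    · have h1' : i + 1 < lines.length := by omega
      have hcond : 1 < j - i ∧ 1 < lines.length - i := by omega
      simp [List.getD, List.getElem?_append, List.length_take, List.length_drop, hcond,
        List.getElem?_take, List.getElem?_drop, h1', hij.le]
  rw [g0, g1]

theorem pvMain (lines : List String) : ∀ n f i blocks,
    lines.length - i ≤ n → lines.length - i < f → pvWf lines i = true →
    (pvOuter lines f i blocks).map pvEntryOfBlock = pvScan lines i (blocks.map pvEntryOfBlock) := by
  intro n
  induction n with
  | zero =>
    intro f i blocks hn hf hwf
    obtain ⟨f', rfl⟩ : ∃ f', f = f' + 1 := ⟨f - 1, by omega⟩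
    have hi : ¬ i < lines.length := by omega
    unfold pvOuter pvScan
    rw [if_neg hi, dif_neg hi]
  | succ n ih =>
    intro f i blocks hn hf hwf
    obtain ⟨f', rfl⟩ : ∃ f', f = f' + 1 := ⟨f - 1, by omega⟩
    by_cases hi : i < lines.length
    · unfold pvWf at hwf
      rw [dif_pos hi] at hwf
      unfold pvOuter pvScan
      rw [if_pos hi, dif_pos hi]
      have hgd : lines.getD i "" = lines[i] := by
        simp [List.getD, List.getElem?_eq_getElem, hi]
      by_cases hop : PySem.Str.isIn "[/" lines[i] = true
      · rw [if_pos hop] at hwf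
        rw [hgd, if_pos hop, if_pos hop]
        by_cases hcl : PySem.Str.isIn "/]" lines[i] = true
        · rw [if_pos hcl] at hwf; simp at hwf
        · rw [if_neg hcl] at hwf
          cases hc : pvClose lines (i + 1) with
          | none => rw [hc] at hwf; simp at hwf
          | some j =>
            rw [hc] at hwf
            obtain ⟨hnb, hwf'⟩ := Bool.and_eq_true_iff.mp hwf
            have hgej := pvClose_ge lines (i + 1) j hc
            obtain ⟨hjlen, hjin, hnomid⟩ := pvClose_spec lines (i + 1) j hc
            have hno : ∀ k, i ≤ k → k < j → PySem.Str.isIn "/]" (lines.getD k "") = false := by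
              intro k hk1 hk2
              rcases Nat.eq_or_lt_of_le hk1 with rfl | hlt
              · rw [hgd]; exact Bool.eq_false_iff.mpr hcl
              · exact hnomid k hlt hk2
            have hinner := pvInner_eq lines j i [] (by omega) hjlen hno hjin
            rw [hinner]
            simp only [List.nil_append]
            rw [if_pos (by simp only [List.length_append, List.length_singleton]; omega)]
            obtain ⟨f'', rfl⟩ : ∃ f'', f' = f'' + 1 := ⟨f' - 1, by omega⟩
            have hnbj : ¬ PySem.Str.isIn "[/" (lines.getD j "") = true := by
              simp only [Bool.not_eq_true'] at hnb
              intro hcon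
              rw [hcon] at hnb
              cases hnb
            unfold pvOuter
            rw [if_pos hjlen, if_neg hnbj]

            rw [ih f'' (j + 1) (blocks ++ [(lines.drop i).take (j - i) ++ [lines.getD j ""]])
              (by omega) (by omega) hwf']
            rw [pvSkip_eq_of_close lines (i + 1) j hc]
            congr 1
            rw [List.map_append, List.map_singleton, pvBlockEntry lines i j (by omega) hjlen, hgd]
      · rw [if_neg hop] at hwf
        rw [hgd, if_neg hop, if_neg hop]
        exact ih f' (i + 1) blocks (by omega) (by omega) hwf
    · unfold pvOuter pvScan
      rw [if_neg hi, dif_neg hi]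

theorem pvFoldA (blocks : List (List String)) (a : String) :
    blocks.foldl (fun acc block =>
      let b0 := PySem.List.pyGetD block 0 ""
      let add_start := PySem.Str.find b0 "/" + 1
      let add_end := PySem.Str.find b0 "]"
      let address := PySem.Str.slice b0 (some add_start) (some add_end)
      let acc := acc ++ "\"" ++ address ++ "\":"
      let b1 := PySem.List.pyGetD block 1 ""
      let npc_id_start := PySem.Str.find b1 ":" + 1
      let npc_id_end := PySem.Str.findFrom b1 "|" npc_id_start
      let npc_id := PySem.Str.slice b1 (some npc_id_start) (some npc_id_end)
      acc ++ npc_id ++ ", ") a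
    = a ++ pvConcat (blocks.map (fun b => pvEntryOfBlock b ++ ", ")) := by
  induction blocks generalizing a with
  | nil => simp [pvConcat]
  | cons b bs ih =>
    simp only [List.foldl_cons, List.map_cons, pvConcat]
    rw [ih]
    simp [pvEntryOfBlock, pvEntry, String.append_assoc]

theorem pvAssemble (entries : List String) :
    (if PySem.Str.len ("{" ++ pvConcat (entries.map (fun e => e ++ ", "))) > 1 then
      PySem.Str.slice ("{" ++ pvConcat (entries.map (fun e => e ++ ", "))) none (some (-2)) ++ "}"
    else "{}")
    = "{" ++ PySem.Str.join ", " entries ++ "}" := by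
  cases entries with
  | nil =>
    rw [if_neg (by simp [PySem.Str.len, pvConcat])]
    decide
  | cons e es =>
    have hflat : (pvConcat ((e :: es).map (fun e => e ++ ", "))).toList
        = PySem.Chars.join [',', ' '] ((e :: es).map String.toList) ++ [',', ' '] := by
      rw [pvConcat_toList, List.map_map]
      rw [show ((e :: es).map (String.toList ∘ fun e => e ++ ", "))
          = (e.toList ++ [',', ' ']) :: (es.map String.toList).map (fun l => l ++ [',', ' ']) from by
        simp [Function.comp, String.toList_append]]
      simpa using pvJoinFlat [',', ' '] (es.map String.toList) e.toList
    rw [if_pos (by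
      have h2 : 3 ≤ ("{" ++ pvConcat ((e :: es).map (fun e => e ++ ", "))).toList.length := by
        rw [String.toList_append, hflat]
        simp
      simp only [PySem.Str.len, PySem.Chars.len_eq, String.length_toList] at *
      omega)]
    apply String.toList_inj.mp
    rw [String.toList_append, pvSliceNegTwo, String.toList_append, hflat]
    rw [show "{".toList ++ (PySem.Chars.join [',', ' '] ((e :: es).map String.toList) ++ [',', ' '])
        = ("{".toList ++ PySem.Chars.join [',', ' '] ((e :: es).map String.toList)) ++ [',', ' '] from by
      simp [List.append_assoc]]
    rw [show (("{".toList ++ PySem.Chars.join [',', ' '] ((e :: es).map String.toList)) ++ [',', ' ']).length - 2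
        = ("{".toList ++ PySem.Chars.join [',', ' '] ((e :: es).map String.toList)).length from by simp]
    rw [List.take_left]
    have hjoin : (PySem.Str.join ", " (e :: es)).toList
        = PySem.Chars.join [',', ' '] ((e :: es).map String.toList) := by
      simp [PySem.Str.join]
    simp [String.toList_append, hjoin]

theorem pvWfAux (lines : List String) : ∀ n k, lines.length - k ≤ n →
    pvWfL true (lines.drop k)
      = (match pvClose lines k with
        | none => false
        | some j => !PySem.Str.isIn "[/" (lines.getD j "") && pvWfL false (lines.drop (j + 1))) := by
  intro n
  induction n with
  | zero =>
    intro k hk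
    have hk' : ¬ k < lines.length := by omega
    rw [List.drop_eq_nil_of_le (by omega)]
    unfold pvClose
    rw [dif_neg hk']
    rfl
  | succ n ih =>
    intro k hk
    by_cases hkl : k < lines.length
    · rw [List.drop_eq_getElem_cons hkl]
      unfold pvClose
      rw [dif_pos hkl]
      show (if PySem.Str.isIn "/]" lines[k] then _ else _) = _
      by_cases hcl : PySem.Str.isIn "/]" lines[k] = true
      · rw [if_pos hcl, if_pos hcl]
        have hgd : lines.getD k "" = lines[k] := by simp [List.getD, hkl]
        show _ = (!PySem.Str.isIn "[/" (lines.getD k "") && pvWfL false (List.drop (k + 1) lines))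
        rw [hgd]
      · rw [if_neg hcl, if_neg hcl]
        exact ih (k + 1) (by omega)
    · rw [List.drop_eq_nil_of_le (by omega)]
      unfold pvClose
      rw [dif_neg hkl]
      rfl

theorem pvWf_eq_pvWfL (lines : List String) : ∀ n i, lines.length - i ≤ n →
    pvWf lines i = pvWfL false (lines.drop i) := by
  intro n
  induction n with
  | zero =>
    intro i hi
    have hi' : ¬ i < lines.length := by omega
    unfold pvWf
    rw [dif_neg hi', List.drop_eq_nil_of_le (by omega)]
    rfl
  | succ n ih =>
    intro i hi
    by_cases hil : i < lines.length
    · rw [List.drop_eq_getElem_cons hil]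
      unfold pvWf
      rw [dif_pos hil]
      show _ = (if PySem.Str.isIn "[/" lines[i] then _ else _)
      by_cases hop : PySem.Str.isIn "[/" lines[i] = true
      · rw [if_pos hop, if_pos hop]
        by_cases hcl : PySem.Str.isIn "/]" lines[i] = true
        · rw [if_pos hcl, hcl]
          rfl
        · rw [if_neg hcl, Bool.eq_false_iff.mpr hcl]
          rw [show (!false && pvWfL true (lines.drop (i + 1))) = pvWfL true (lines.drop (i + 1)) from by simp]
          rw [pvWfAux lines (lines.length - (i + 1)) (i + 1) (by omega)]
          cases hc : pvClose lines (i + 1) with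
          | none => rfl
          | some j =>
            have h1 := pvClose_ge lines (i + 1) j hc
            have h2 := (pvClose_spec lines (i + 1) j hc).1
            show (!PySem.Str.isIn "[/" (lines.getD j "") && pvWf lines (j + 1))
              = (!PySem.Str.isIn "[/" (lines.getD j "") && pvWfL false (List.drop (j + 1) lines))
            rw [ih (j + 1) (by omega)]
      · rw [if_neg hop, if_neg hop]
        exact ih (i + 1) (by omega)
    · unfold pvWf
      rw [dif_neg hil, List.drop_eq_nil_of_le (by omega)]
      rfl

-- ===== VERDICT (by name: the statement is the Claim_ definition above) =====
theorem convert_npc_switchers_spec : Claim_equal_convert_npc_switchers := by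
  intro lines _ hpre
  unfold Pre_convert_npc_switchers at hpre
  rw [show (lines : List String) = lines.drop 0 from rfl, ← pvWf_eq_pvWfL lines lines.length 0 (by omega)] at hpre
  unfold Spec_convert_npc_switchers
  simp only [convert_npc_switchers, convert_npc_switchers_alt, parse_blocks]
  have hmap : (pvOuter lines (lines.length + 1) 0 []).map pvEntryOfBlock
      = pvScan lines 0 [] := by
    simpa using pvMain lines lines.length (lines.length + 1) 0 [] (by omega) (by omega) hpre
  rw [pvFoldA]
  have : (pvOuter lines (lines.length + 1) 0 []).map (fun b => pvEntryOfBlock b ++ ", ")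
      = (pvScan lines 0 []).map (fun e => e ++ ", ") := by
    rw [← hmap, List.map_map]; rfl
  rw [this, pvAssemble]
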